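-- pv_equiv track=rewrite | github.com/Multu/vps | level0/lesson23/main.py | destroy_tree
-- ===== SOURCE A (Python) =====
-- def destroy_tree(H, W, tree):
--     new_tree = list(tree)
--
--     for i in range(H):
--         for j in range(W):
--             if new_tree[i][j] >= 3:
--                 i_up = i - 1
--                 if 0 <= i_up <= H - 1 and new_tree[i_up][j] < 3:
--                     new_tree[i_up][j] = 0
--
--                 i_down = i + 1
--                 if 0 <= i_down <= H - 1 and new_tree[i_down][j] < 3:
--                     new_tree[i_down][j] = 0
--
--                 j_left = j - 1
--                 if 0 <= j_left <= W - 1 and new_tree[i][j_left] < 3: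
--                     new_tree[i][j_left] = 0
--
--                 j_rigth = j + 1
--                 if 0 <= j_rigth <= W - 1 and new_tree[i][j_rigth] < 3:
--                     new_tree[i][j_rigth] = 0
--
--     for i in range(H):
--         for j in range(W):
--             if new_tree[i][j] >= 3:
--                 new_tree[i][j] = 0
--
--     return new_tree
-- ===== SOURCE B (Python) =====
-- def destroy_tree(H, W, tree):
--     orig = [row[:] for row in tree]
--     new_tree = list(tree)
--     for i in range(H):
--         for j in range(W):
--             if (orig[i][j] >= 3
--                     or (i > 0 and orig[i - 1][j] >= 3)
--                     or (i < H - 1 and orig[i + 1][j] >= 3)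
--                     or (j > 0 and orig[i][j - 1] >= 3)
--                     or (j < W - 1 and orig[i][j + 1] >= 3)):
--                 new_tree[i][j] = 0
--     return new_tree
-- ===== Notes on version B (the rewrite author's own statement) =====
-- stated objective: simpler
-- what changed: A scatters zeros to the <3 neighbours of every >=3 cell and then clears the >=3 cells in a second double pass over the grid; B takes a read-only snapshot of the grid and makes a single pass, zeroing a cell exactly when it or an in-bounds orthogonal neighbour holds >=3 in the snapshot. Pre_ excludes only inputs where both programs raise IndexError (fewer than H rows, or a row among the first H shorter than W, with H,W positive).
import Mathlib
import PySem

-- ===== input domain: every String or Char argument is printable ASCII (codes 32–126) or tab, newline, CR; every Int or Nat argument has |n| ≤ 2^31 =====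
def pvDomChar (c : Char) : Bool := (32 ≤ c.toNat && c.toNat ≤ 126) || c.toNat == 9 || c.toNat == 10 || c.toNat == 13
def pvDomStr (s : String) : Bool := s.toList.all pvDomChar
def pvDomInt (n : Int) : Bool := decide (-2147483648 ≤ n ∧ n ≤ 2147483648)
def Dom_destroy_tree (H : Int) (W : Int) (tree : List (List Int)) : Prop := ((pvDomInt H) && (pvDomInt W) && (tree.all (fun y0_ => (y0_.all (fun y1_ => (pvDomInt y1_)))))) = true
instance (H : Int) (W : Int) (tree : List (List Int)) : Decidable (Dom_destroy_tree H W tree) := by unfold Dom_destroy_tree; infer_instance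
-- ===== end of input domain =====

-- B replaces A's two-pass scatter-then-cleanup mutation with one snapshot-reading pass
-- (objective: simpler). Both Pythons mutate the rows of `tree` in place the same way;
-- the theorems below are about the RETURN value.

-- ===== PORT A =====
-- tree[i][j] read (valid under Pre_, where Python never raises)
def cellG (t : List (List Int)) (i j : Int) : Int :=
  PySem.List.pyGetD (PySem.List.pyGetD t i []) j 0

-- new_tree[i][j] = v (indices are nonnegative and in range wherever A executes it)
def setC (t : List (List Int)) (i j : Int) (v : Int) : List (List Int) :=
  t.modify i.toNat (fun row => row.set j.toNat v)

-- A's four neighbour-clearing if-statements, one def per statement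
def write1 (H : Int) (t : List (List Int)) (i j : Int) : List (List Int) :=
  if 0 ≤ i - 1 ∧ i - 1 ≤ H - 1 ∧ cellG t (i - 1) j < 3 then setC t (i - 1) j 0 else t

def write2 (H : Int) (t : List (List Int)) (i j : Int) : List (List Int) :=
  if 0 ≤ i + 1 ∧ i + 1 ≤ H - 1 ∧ cellG t (i + 1) j < 3 then setC t (i + 1) j 0 else t

def write3 (W : Int) (t : List (List Int)) (i j : Int) : List (List Int) :=
  if 0 ≤ j - 1 ∧ j - 1 ≤ W - 1 ∧ cellG t i (j - 1) < 3 then setC t i (j - 1) 0 else t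

def write4 (W : Int) (t : List (List Int)) (i j : Int) : List (List Int) :=
  if 0 ≤ j + 1 ∧ j + 1 ≤ W - 1 ∧ cellG t i (j + 1) < 3 then setC t i (j + 1) 0 else t

-- body of A's first double loop, one (i, j) step
def stepA1 (H W : Int) (t : List (List Int)) (i j : Int) : List (List Int) :=
  if 3 ≤ cellG t i j then write4 W (write3 W (write2 H (write1 H t i j) i j) i j) i j else t

-- body of A's second double loop
def stepA2 (t : List (List Int)) (i j : Int) : List (List Int) :=
  if 3 ≤ cellG t i j then setC t i j 0 else t

def destroy_tree (H : Int) (W : Int) (tree : List (List Int)) : List (List Int) :=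
  let t1 := (PySem.List.pyRange 0 H 1).foldl
    (fun t i => (PySem.List.pyRange 0 W 1).foldl (fun t j => stepA1 H W t i j) t) tree
  (PySem.List.pyRange 0 H 1).foldl
    (fun t i => (PySem.List.pyRange 0 W 1).foldl (fun t j => stepA2 t i j) t) t1

-- ===== PORT B =====
-- B's destruction test: the cell or an in-bounds orthogonal neighbour holds ≥ 3 in the snapshot
abbrev boomP (H W : Int) (orig : List (List Int)) (i j : Int) : Prop :=
  3 ≤ cellG orig i j ∨
  (0 < i ∧ 3 ≤ cellG orig (i - 1) j) ∨
  (i < H - 1 ∧ 3 ≤ cellG orig (i + 1) j) ∨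
  (0 < j ∧ 3 ≤ cellG orig i (j - 1)) ∨
  (j < W - 1 ∧ 3 ≤ cellG orig i (j + 1))

-- body of B's single double loop
def stepB (H W : Int) (orig t : List (List Int)) (i j : Int) : List (List Int) :=
  if boomP H W orig i j then setC t i j 0 else t

def destroy_tree_alt (H : Int) (W : Int) (tree : List (List Int)) : List (List Int) :=
  let orig := tree.map (fun row => row)   -- orig = [row[:] for row in tree]
  (PySem.List.pyRange 0 H 1).foldl
    (fun t i => (PySem.List.pyRange 0 W 1).foldl (fun t j => stepB H W orig t i j) t) tree

-- ===== PRECONDITION & SPEC =====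
-- Pre_ excludes exactly the inputs where Python A raises IndexError: a nonempty loop range
-- (0 < H and 0 < W) needs H rows, the first H of them of length ≥ W.
def Pre_destroy_tree (H : Int) (W : Int) (tree : List (List Int)) : Prop :=
  0 < H → 0 < W → (H.toNat ≤ tree.length ∧ ∀ row ∈ tree.take H.toNat, W.toNat ≤ row.length)
instance (H : Int) (W : Int) (tree : List (List Int)) : Decidable (Pre_destroy_tree H W tree) := by
  unfold Pre_destroy_tree; infer_instance

def pvWitness_destroy_tree : Int × Int × List (List Int) := (2, 2, [[3, 1], [0, 5]])

def Spec_destroy_tree (H : Int) (W : Int) (tree : List (List Int)) (out : List (List Int)) : Prop := out = destroy_tree_alt H W tree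
instance (H : Int) (W : Int) (tree : List (List Int)) (out : List (List Int)) : Decidable (Spec_destroy_tree H W tree out) := by unfold Spec_destroy_tree; infer_instance

-- ===== CLAIM (what is proved, stated in full; the proofs are below) =====
def Claim_equal_destroy_tree : Prop := ∀ (H : Int) (W : Int) (tree : List (List Int)), Dom_destroy_tree H W tree → Pre_destroy_tree H W tree → Spec_destroy_tree H W tree (destroy_tree H W tree)

-- ===== LEMMAS AND PROOFS =====

-- cell read with Nat indices
def gN (t : List (List Int)) (p q : Nat) : Int := (t.getD p []).getD q 0

-- row length with a Nat index
def rlen (t : List (List Int)) (p : Nat) : Nat := (t.getD p []).length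

-- same outer length and same row lengths
def Shape (t s : List (List Int)) : Prop := s.length = t.length ∧ ∀ p, rlen s p = rlen t p

-- orthogonal adjacency of grid positions
def adjN (a b p q : Nat) : Bool :=
  (a == p && (b + 1 == q || q + 1 == b)) || (b == q && (a + 1 == p || p + 1 == a))

-- some position in P is adjacent to (p, q) and holds ≥ 3 in the original grid
def fired (tree : List (List Int)) (P : List (Nat × Nat)) (p q : Nat) : Bool :=
  P.any (fun ab => decide (3 ≤ gN tree ab.1 ab.2) && adjN ab.1 ab.2 p q)

-- invariant of A's first double loop after processing position list P
def Inv1 (Hn Wn : Nat) (tree s : List (List Int)) (P : List (Nat × Nat)) : Prop :=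
  Shape tree s ∧
  ∀ p q, gN s p q =
    if p < Hn ∧ q < Wn ∧ gN tree p q < 3 ∧ fired tree P p q = true then 0 else gN tree p q

-- invariant of A's second double loop
def Inv2 (t1 s : List (List Int)) (P : List (Nat × Nat)) : Prop :=
  Shape t1 s ∧
  ∀ p q, gN s p q = if (p, q) ∈ P ∧ 3 ≤ gN t1 p q then 0 else gN t1 p q

-- invariant of B's single double loop
def InvB (H W : Int) (tree s : List (List Int)) (P : List (Nat × Nat)) : Prop :=
  Shape tree s ∧
  ∀ p q, gN s p q =
    if (p, q) ∈ P ∧ boomP H W tree (p : Int) (q : Int) then 0 else gN tree p q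

-- row-major list of all grid positions
def posL (Hn Wn : Nat) : List (Nat × Nat) :=
  (List.range Hn).flatMap (fun i => (List.range Wn).map (fun j => (i, j)))

theorem cellG_natCast (t : List (List Int)) (p q : Nat) : cellG t p q = gN t p q := by
  simp [cellG, gN, PySem.List.pyGetD_natCast]

theorem shape_refl (t : List (List Int)) : Shape t t := ⟨rfl, fun _ => rfl⟩

theorem shape_trans {t s u : List (List Int)} (h1 : Shape t s) (h2 : Shape s u) : Shape t u :=
  ⟨h2.1.trans h1.1, fun p => (h2.2 p).trans (h1.2 p)⟩

theorem shape_setC (t : List (List Int)) (i j v) : Shape t (setC t i j v) := by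
  constructor
  · simp [setC]
  · intro p
    simp only [setC, rlen, List.getD_eq_getElem?_getD, List.getElem?_modify]
    rcases h : t[p]? with _ | row <;> by_cases hip : i.toNat = p <;> simp [hip]

theorem gN_setC (t : List (List Int)) (a b : Nat) (v : Int) (p q : Nat) :
    gN (setC t (a : Int) (b : Int) v) p q =
      if p = a ∧ q = b ∧ a < t.length ∧ b < rlen t a then v else gN t p q := by
  simp only [gN, setC, rlen, Int.toNat_natCast, List.getD_eq_getElem?_getD,
    List.getElem?_modify, Option.map_eq_map]
  rcases h : t[p]? with _ | row
  · have hnl : ¬ p < t.length := by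
      intro hlt; exact absurd h (by simp [List.getElem?_eq_getElem hlt])
    simp only [Option.map_none, Option.getD_none, List.getElem?_nil]
    split_ifs with hc
    · obtain ⟨rfl, _, hl, _⟩ := hc; exact absurd hl hnl
    · rfl
  · have hlt : p < t.length := by
      by_contra hn; rw [List.getElem?_eq_none (by omega)] at h; exact absurd h (by simp)
    simp only [Option.map_some, Option.getD_some]
    by_cases hap : a = p
    · subst hap
      have hrw : (t[a]?.getD []).length = row.length := by rw [h]; rfl
      rw [if_pos rfl, hrw, List.getElem?_set]
      by_cases hbq : b = q
      · subst hbq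
        by_cases hbr : b < row.length
        · rw [if_pos rfl, if_pos hbr, if_pos ⟨rfl, rfl, hlt, hbr⟩]
          simp
        · rw [if_pos rfl, if_neg hbr, if_neg (fun hc => hbr hc.2.2.2),
            List.getElem?_eq_none (by omega)]
      · rw [if_neg hbq, if_neg (fun hc => hbq hc.2.1.symm)]
    · simp only [if_neg hap]
      rw [if_neg (by rintro ⟨rfl, _⟩; exact hap rfl)]

theorem nested_eq (H W : Int) (f : List (List Int) → Int → Int → List (List Int))
    (s : List (List Int)) :
    (PySem.List.pyRange 0 H 1).foldl
        (fun t i => (PySem.List.pyRange 0 W 1).foldl (fun t j => f t i j) t) s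
      = (posL H.toNat W.toNat).foldl (fun t ab => f t (ab.1 : Int) (ab.2 : Int)) s := by
  simp only [posL, List.foldl_flatMap, PySem.List.pyRange_one, List.foldl_map, sub_zero, zero_add]

theorem writeRow_char (Hn Wn : Nat) (tree t : List (List Int))
    (hlen : Hn ≤ tree.length) (hrow : ∀ p < Hn, Wn ≤ rlen tree p) (hsh : Shape tree t)
    (HI : Int) (hH : HI.toNat = Hn) (a b : Int) (hb0 : 0 ≤ b) (hbW : b.toNat < Wn) :
    Shape tree (if 0 ≤ a ∧ a ≤ HI - 1 ∧ cellG t a b < 3 then setC t a b 0 else t) ∧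
    ∀ p q : Nat, gN (if 0 ≤ a ∧ a ≤ HI - 1 ∧ cellG t a b < 3 then setC t a b 0 else t) p q =
      if 0 ≤ a ∧ a ≤ HI - 1 ∧ cellG t a b < 3 ∧ (p : Int) = a ∧ (q : Int) = b then 0
      else gN t p q := by
  by_cases hc : 0 ≤ a ∧ a ≤ HI - 1 ∧ cellG t a b < 3
  · obtain ⟨ha0, haH, hval⟩ := hc
    have ea : a = ((a.toNat : Nat) : Int) := by omega
    have eb : b = ((b.toNat : Nat) : Int) := by omega
    have haHn : a.toNat < Hn := by omega
    have hat : a.toNat < t.length := by rw [hsh.1]; omega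
    have hbt : b.toNat < rlen t a.toNat := by
      rw [hsh.2 a.toNat]; exact lt_of_lt_of_le hbW (hrow a.toNat haHn)
    rw [if_pos ⟨ha0, haH, hval⟩]
    refine ⟨shape_trans hsh (shape_setC t a b 0), fun p q => ?_⟩
    rw [ea, eb] at hval ⊢
    rw [show setC t ((a.toNat : Nat) : Int) ((b.toNat : Nat) : Int) 0
          = setC t (a.toNat : Nat) (b.toNat : Nat) 0 from rfl, gN_setC]
    rw [cellG_natCast] at hval
    split_ifs with h1 h2 h3
    · rfl
    · exact absurd ⟨by omega, by omega, by rw [cellG_natCast]; exact hval,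
        by exact_mod_cast h1.1, by exact_mod_cast h1.2.1⟩ h2
    · exact absurd ⟨by exact_mod_cast h3.2.2.2.1, by exact_mod_cast h3.2.2.2.2, hat, hbt⟩ h1
    · rfl
  · rw [if_neg hc]
    refine ⟨hsh, fun p q => ?_⟩
    rw [if_neg (fun hx => hc ⟨hx.1, hx.2.1, hx.2.2.1⟩)]

theorem writeCol_char (Hn Wn : Nat) (tree t : List (List Int))
    (hlen : Hn ≤ tree.length) (hrow : ∀ p < Hn, Wn ≤ rlen tree p) (hsh : Shape tree t)
    (WI : Int) (hW : WI.toNat = Wn) (a b : Int) (ha0 : 0 ≤ a) (haH : a.toNat < Hn) :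
    Shape tree (if 0 ≤ b ∧ b ≤ WI - 1 ∧ cellG t a b < 3 then setC t a b 0 else t) ∧
    ∀ p q : Nat, gN (if 0 ≤ b ∧ b ≤ WI - 1 ∧ cellG t a b < 3 then setC t a b 0 else t) p q =
      if 0 ≤ b ∧ b ≤ WI - 1 ∧ cellG t a b < 3 ∧ (p : Int) = a ∧ (q : Int) = b then 0
      else gN t p q := by
  by_cases hc : 0 ≤ b ∧ b ≤ WI - 1 ∧ cellG t a b < 3
  · obtain ⟨hb0, hbW, hval⟩ := hc
    have ea : a = ((a.toNat : Nat) : Int) := by omega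
    have eb : b = ((b.toNat : Nat) : Int) := by omega
    have hat : a.toNat < t.length := by rw [hsh.1]; omega
    have hbt : b.toNat < rlen t a.toNat := by
      rw [hsh.2 a.toNat]; exact lt_of_lt_of_le (by omega) (hrow a.toNat haH)
    rw [if_pos ⟨hb0, hbW, hval⟩]
    refine ⟨shape_trans hsh (shape_setC t a b 0), fun p q => ?_⟩
    rw [ea, eb] at hval ⊢
    rw [show setC t ((a.toNat : Nat) : Int) ((b.toNat : Nat) : Int) 0
          = setC t (a.toNat : Nat) (b.toNat : Nat) 0 from rfl, gN_setC]
    rw [cellG_natCast] at hval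
    split_ifs with h1 h2 h3
    · rfl
    · exact absurd ⟨by omega, by omega, by rw [cellG_natCast]; exact hval,
        by exact_mod_cast h1.1, by exact_mod_cast h1.2.1⟩ h2
    · exact absurd ⟨by exact_mod_cast h3.2.2.2.1, by exact_mod_cast h3.2.2.2.2, hat, hbt⟩ h1
    · rfl
  · rw [if_neg hc]
    refine ⟨hsh, fun p q => ?_⟩
    rw [if_neg (fun hx => hc ⟨hx.1, hx.2.1, hx.2.2.1⟩)]

theorem write1_char (Hn Wn : Nat) (tree t : List (List Int))
    (hlen : Hn ≤ tree.length) (hrow : ∀ p < Hn, Wn ≤ rlen tree p) (hsh : Shape tree t)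
    (HI : Int) (hH : HI.toNat = Hn) (i j : Nat) (hjW : j < Wn) :
    Shape tree (write1 HI t (i : Int) (j : Int)) ∧
    ∀ p q : Nat, gN (write1 HI t (i : Int) (j : Int)) p q =
      if 0 ≤ (i : Int) - 1 ∧ (i : Int) - 1 ≤ HI - 1 ∧ cellG t ((i : Int) - 1) (j : Int) < 3 ∧
          (p : Int) = (i : Int) - 1 ∧ (q : Int) = (j : Int) then 0
      else gN t p q := by
  unfold write1
  exact writeRow_char Hn Wn tree t hlen hrow hsh HI hH ((i : Int) - 1) (j : Int) (by omega) (by omega)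

theorem write2_char (Hn Wn : Nat) (tree t : List (List Int))
    (hlen : Hn ≤ tree.length) (hrow : ∀ p < Hn, Wn ≤ rlen tree p) (hsh : Shape tree t)
    (HI : Int) (hH : HI.toNat = Hn) (i j : Nat) (hjW : j < Wn) :
    Shape tree (write2 HI t (i : Int) (j : Int)) ∧
    ∀ p q : Nat, gN (write2 HI t (i : Int) (j : Int)) p q =
      if 0 ≤ (i : Int) + 1 ∧ (i : Int) + 1 ≤ HI - 1 ∧ cellG t ((i : Int) + 1) (j : Int) < 3 ∧
          (p : Int) = (i : Int) + 1 ∧ (q : Int) = (j : Int) then 0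
      else gN t p q := by
  unfold write2
  exact writeRow_char Hn Wn tree t hlen hrow hsh HI hH ((i : Int) + 1) (j : Int) (by omega) (by omega)

theorem write3_char (Hn Wn : Nat) (tree t : List (List Int))
    (hlen : Hn ≤ tree.length) (hrow : ∀ p < Hn, Wn ≤ rlen tree p) (hsh : Shape tree t)
    (WI : Int) (hW : WI.toNat = Wn) (i j : Nat) (hiH : i < Hn) :
    Shape tree (write3 WI t (i : Int) (j : Int)) ∧
    ∀ p q : Nat, gN (write3 WI t (i : Int) (j : Int)) p q =
      if 0 ≤ (j : Int) - 1 ∧ (j : Int) - 1 ≤ WI - 1 ∧ cellG t (i : Int) ((j : Int) - 1) < 3 ∧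
          (p : Int) = (i : Int) ∧ (q : Int) = (j : Int) - 1 then 0
      else gN t p q := by
  unfold write3
  exact writeCol_char Hn Wn tree t hlen hrow hsh WI hW (i : Int) ((j : Int) - 1) (by omega) (by omega)

theorem write4_char (Hn Wn : Nat) (tree t : List (List Int))
    (hlen : Hn ≤ tree.length) (hrow : ∀ p < Hn, Wn ≤ rlen tree p) (hsh : Shape tree t)
    (WI : Int) (hW : WI.toNat = Wn) (i j : Nat) (hiH : i < Hn) :
    Shape tree (write4 WI t (i : Int) (j : Int)) ∧
    ∀ p q : Nat, gN (write4 WI t (i : Int) (j : Int)) p q =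
      if 0 ≤ (j : Int) + 1 ∧ (j : Int) + 1 ≤ WI - 1 ∧ cellG t (i : Int) ((j : Int) + 1) < 3 ∧
          (p : Int) = (i : Int) ∧ (q : Int) = (j : Int) + 1 then 0
      else gN t p q := by
  unfold write4
  exact writeCol_char Hn Wn tree t hlen hrow hsh WI hW (i : Int) ((j : Int) + 1) (by omega) (by omega)

theorem fired_append (tree : List (List Int)) (P : List (Nat × Nat)) (i j p q : Nat) :
    fired tree (P ++ [(i, j)]) p q
      = (fired tree P p q || (decide (3 ≤ gN tree i j) && adjN i j p q)) := by
  simp [fired, List.any_append]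

theorem inv_step (H W : Int) (tree s : List (List Int)) (P : List (Nat × Nat)) (i j : Nat)
    (hlen : H.toNat ≤ tree.length) (hrow : ∀ p < H.toNat, W.toNat ≤ rlen tree p)
    (hi : i < H.toNat) (hj : j < W.toNat) (hInv : Inv1 H.toNat W.toNat tree s P) :
    Inv1 H.toNat W.toNat tree (stepA1 H W s (i : Int) (j : Int)) (P ++ [(i, j)]) := by
  obtain ⟨hsh, hg⟩ := hInv
  have hlt3 : ∀ p q, gN s p q < 3 ↔ gN tree p q < 3 := by
    intro p q; rw [hg p q]; split_ifs with hc
    · have := hc.2.2.1; constructor <;> intro <;> omega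
    · exact Iff.rfl
  unfold stepA1
  rw [cellG_natCast]
  by_cases hv : 3 ≤ gN s i j
  · rw [if_pos hv]
    have hvt : 3 ≤ gN tree i j := by
      by_contra hco
      have h2 := (hlt3 i j).2 (by omega)
      omega
    have hdec : decide (3 ≤ gN tree i j) = true := decide_eq_true hvt
    obtain ⟨sh1, hg1⟩ := write1_char H.toNat W.toNat tree s hlen hrow hsh H rfl i j hj
    obtain ⟨sh2, hg2⟩ := write2_char H.toNat W.toNat tree _ hlen hrow sh1 H rfl i j hj
    obtain ⟨sh3, hg3⟩ := write3_char H.toNat W.toNat tree _ hlen hrow sh2 W rfl i j hi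
    obtain ⟨sh4, hg4⟩ := write4_char H.toNat W.toNat tree _ hlen hrow sh3 W rfl i j hi
    refine ⟨sh4, fun p q => ?_⟩
    rw [hg4 p q, hg3 p q, hg2 p q, hg1 p q]
    have c4v : cellG (write3 W (write2 H (write1 H s (i : Int) (j : Int)) (i : Int) (j : Int)) (i : Int) (j : Int)) (i : Int) ((j : Int) + 1) = gN s i (j + 1) := by
      rw [show ((j : Int) + 1) = ((j + 1 : Nat) : Int) by omega, cellG_natCast,
        hg3 i (j + 1), if_neg (by rintro ⟨-, -, -, -, h5⟩; omega),
        hg2 i (j + 1), if_neg (by rintro ⟨-, -, -, h4, -⟩; omega),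
        hg1 i (j + 1), if_neg (by rintro ⟨-, -, -, h4, -⟩; omega)]
    have c2v : cellG (write1 H s (i : Int) (j : Int)) ((i : Int) + 1) (j : Int) = gN s (i + 1) j := by
      rw [show ((i : Int) + 1) = ((i + 1 : Nat) : Int) by omega, cellG_natCast,
        hg1 (i + 1) j, if_neg (by rintro ⟨-, -, -, h4, -⟩; omega)]
    have c3v : 1 ≤ j → cellG (write2 H (write1 H s (i : Int) (j : Int)) (i : Int) (j : Int)) (i : Int) ((j : Int) - 1) = gN s i (j - 1) := by
      intro h1j
      rw [show ((j : Int) - 1) = ((j - 1 : Nat) : Int) by omega, cellG_natCast,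
        hg2 i (j - 1), if_neg (by rintro ⟨-, -, -, h4, -⟩; omega),
        hg1 i (j - 1), if_neg (by rintro ⟨-, -, -, h4, -⟩; omega)]
    have c1v : 1 ≤ i → cellG s ((i : Int) - 1) (j : Int) = gN s (i - 1) j := by
      intro h1i
      rw [show ((i : Int) - 1) = ((i - 1 : Nat) : Int) by omega, cellG_natCast]
    rw [c4v, c2v, fired_append, hdec, Bool.true_and]
    by_cases cA : i - 1 = p ∧ j = q ∧ 1 ≤ i
    · obtain ⟨rfl, rfl, h1i⟩ := cA
      rw [if_neg (by rintro ⟨-, -, -, h4, -⟩; omega),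
        if_neg (by rintro ⟨-, -, -, h4, -⟩; omega),
        if_neg (by rintro ⟨-, -, -, h4, -⟩; omega),
        c1v h1i]
      have hadj : adjN i j (i - 1) j = true := by simp only [adjN]; simp; omega
      rw [hadj, Bool.or_true]
      by_cases hval : gN s (i - 1) j < 3
      · rw [if_pos ⟨by omega, by omega, hval, by omega, by omega⟩,
          if_pos ⟨by omega, hj, (hlt3 _ _).1 hval, rfl⟩]
      · rw [if_neg (by rintro ⟨-, -, h3, -⟩; exact hval h3), hg,
          if_neg (by rintro ⟨-, -, h3, -⟩; exact hval ((hlt3 _ _).2 h3)),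
          if_neg (by rintro ⟨-, -, h3, -⟩; exact hval ((hlt3 _ _).2 h3))]
    · by_cases cB : i + 1 = p ∧ j = q
      · obtain ⟨rfl, rfl⟩ := cB
        rw [if_neg (by rintro ⟨-, -, -, h4, -⟩; omega),
          if_neg (by rintro ⟨-, -, -, h4, -⟩; omega)]
        by_cases hiH : i + 1 < H.toNat
        · have hadj : adjN i j (i + 1) j = true := by simp only [adjN]; simp
          rw [hadj, Bool.or_true]
          by_cases hval : gN s (i + 1) j < 3
          · rw [if_pos ⟨by omega, by omega, hval, by omega, rfl⟩,
              if_pos ⟨hiH, hj, (hlt3 _ _).1 hval, rfl⟩]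
          · rw [if_neg (by rintro ⟨-, -, h3, -⟩; exact hval h3),
              if_neg (by rintro ⟨h1, -, -, h4, -⟩; omega), hg,
              if_neg (by rintro ⟨-, -, h3, -⟩; exact hval ((hlt3 _ _).2 h3)),
              if_neg (by rintro ⟨-, -, h3, -⟩; exact hval ((hlt3 _ _).2 h3))]
        · rw [if_neg (by rintro ⟨-, h2, -⟩; omega),
            if_neg (by rintro ⟨h1, -, -, h4, -⟩; omega), hg,
            if_neg (by rintro ⟨h1, -⟩; omega),
            if_neg (by rintro ⟨h1, -⟩; omega)]
      · by_cases cC : i = p ∧ j - 1 = q ∧ 1 ≤ j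
        · obtain ⟨rfl, rfl, h1j⟩ := cC
          rw [if_neg (by rintro ⟨-, -, -, -, h5⟩; omega), c3v h1j]
          have hadj : adjN i j i (j - 1) = true := by simp only [adjN]; simp; omega
          rw [hadj, Bool.or_true]
          by_cases hval : gN s i (j - 1) < 3
          · rw [if_pos ⟨by omega, by omega, hval, rfl, by omega⟩,
              if_pos ⟨hi, by omega, (hlt3 _ _).1 hval, rfl⟩]
          · rw [if_neg (by rintro ⟨-, -, h3, -⟩; exact hval h3),
              if_neg (by rintro ⟨-, -, -, h4, -⟩; omega),
              if_neg (by rintro ⟨-, -, -, -, h5⟩; omega), hg,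
              if_neg (by rintro ⟨-, -, h3, -⟩; exact hval ((hlt3 _ _).2 h3)),
              if_neg (by rintro ⟨-, -, h3, -⟩; exact hval ((hlt3 _ _).2 h3))]
        · by_cases cD : i = p ∧ j + 1 = q
          · obtain ⟨rfl, rfl⟩ := cD
            by_cases hjW : j + 1 < W.toNat
            · have hadj : adjN i j i (j + 1) = true := by simp only [adjN]; simp
              rw [hadj, Bool.or_true]
              by_cases hval : gN s i (j + 1) < 3
              · rw [if_pos ⟨by omega, by omega, hval, rfl, by omega⟩,
                  if_pos ⟨hi, hjW, (hlt3 _ _).1 hval, rfl⟩]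
              · rw [if_neg (by rintro ⟨-, -, h3, -⟩; exact hval h3),
                  if_neg (by rintro ⟨-, -, -, -, h5⟩; omega),
                  if_neg (by rintro ⟨-, -, -, h4, -⟩; omega),
                  if_neg (by rintro ⟨-, -, -, h4, -⟩; omega), hg,
                  if_neg (by rintro ⟨-, -, h3, -⟩; exact hval ((hlt3 _ _).2 h3)),
                  if_neg (by rintro ⟨-, -, h3, -⟩; exact hval ((hlt3 _ _).2 h3))]
            · rw [if_neg (by rintro ⟨-, h2, -⟩; omega),
                if_neg (by rintro ⟨-, -, -, -, h5⟩; omega),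
                if_neg (by rintro ⟨-, -, -, h4, -⟩; omega),
                if_neg (by rintro ⟨-, -, -, h4, -⟩; omega), hg,
                if_neg (by rintro ⟨-, h2, -⟩; omega),
                if_neg (by rintro ⟨-, h2, -⟩; omega)]
          · rw [if_neg (by rintro ⟨-, -, -, h4, h5⟩; exact cD ⟨by omega, by omega⟩),
              if_neg (by rintro ⟨h1, -, -, h4, h5⟩; exact cC ⟨by omega, by omega, by omega⟩),
              if_neg (by rintro ⟨-, -, -, h4, h5⟩; exact cB ⟨by omega, by omega⟩),
              if_neg (by rintro ⟨h1, -, -, h4, h5⟩; exact cA ⟨by omega, by omega, by omega⟩),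
              hg]
            have hadj : adjN i j p q = false := by
              simp only [adjN]; simp; omega
            rw [hadj, Bool.or_false]
  · rw [if_neg hv]
    have hvt : ¬ 3 ≤ gN tree i j := by
      intro h
      have h2 := (hlt3 i j).1
      omega
    refine ⟨hsh, fun p q => ?_⟩
    rw [hg p q, fired_append]
    have hdec : decide (3 ≤ gN tree i j) = false := decide_eq_false hvt
    rw [hdec, Bool.false_and, Bool.or_false]

theorem inv_fold (H W : Int) (tree : List (List Int))
    (hlen : H.toNat ≤ tree.length) (hrow : ∀ p < H.toNat, W.toNat ≤ rlen tree p) :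
    ∀ (Q P : List (Nat × Nat)) (s : List (List Int)),
      (∀ ab ∈ Q, ab.1 < H.toNat ∧ ab.2 < W.toNat) → Inv1 H.toNat W.toNat tree s P →
      Inv1 H.toNat W.toNat tree
        (Q.foldl (fun t ab => stepA1 H W t (ab.1 : Int) (ab.2 : Int)) s) (P ++ Q) := by
  intro Q
  induction Q with
  | nil => intro P s _ h; simpa using h
  | cons ab Q ih =>
    intro P s hQ h
    have h1 := inv_step H W tree s P ab.1 ab.2 hlen hrow (hQ ab (by simp)).1 (hQ ab (by simp)).2 h
    have := ih (P ++ [ab]) _ (fun x hx => hQ x (by simp [hx])) h1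
    simpa using this

theorem rlen_eq (t : List (List Int)) (p : Nat) (h : p < t.length) :
    rlen t p = t[p].length := by
  simp [rlen, List.getD_eq_getElem?_getD, List.getElem?_eq_getElem h]

theorem gN_eq (t : List (List Int)) (p q : Nat) (hp : p < t.length) (hq : q < t[p].length) :
    gN t p q = t[p][q] := by
  simp [gN, List.getD_eq_getElem?_getD, List.getElem?_eq_getElem hp,
    List.getElem?_eq_getElem hq]

theorem mem_snoc_ne (P : List (Nat × Nat)) (i j p q : Nat) (hne : ¬(i = p ∧ j = q)) :
    ((p, q) ∈ P ++ [(i, j)]) ↔ (p, q) ∈ P := by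
  simp only [List.mem_append, List.mem_singleton, Prod.mk.injEq]
  constructor
  · rintro (h | ⟨rfl, rfl⟩)
    · exact h
    · exact absurd ⟨rfl, rfl⟩ hne
  · exact Or.inl

theorem inv2_step (t1 s : List (List Int)) (P : List (Nat × Nat)) (i j : Nat)
    (hit : i < t1.length) (hjt : j < rlen t1 i) (hInv : Inv2 t1 s P) :
    Inv2 t1 (stepA2 s (i : Int) (j : Int)) (P ++ [(i, j)]) := by
  obtain ⟨hsh, hg⟩ := hInv
  unfold stepA2
  rw [cellG_natCast]
  by_cases hv : 3 ≤ gN s i j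
  · rw [if_pos hv]
    have hvt : 3 ≤ gN t1 i j := by
      have h0 := hg i j
      by_contra hco
      rw [if_neg (by rintro ⟨-, h2⟩; omega)] at h0
      omega
    refine ⟨shape_trans hsh (shape_setC s (i : Int) (j : Int) 0), fun p q => ?_⟩
    rw [gN_setC]
    by_cases hpq : i = p ∧ j = q
    · obtain ⟨rfl, rfl⟩ := hpq
      rw [if_pos ⟨rfl, rfl, by rw [hsh.1]; exact hit, by rw [hsh.2]; exact hjt⟩,
        if_pos ⟨by simp, hvt⟩]
    · rw [if_neg (by rintro ⟨h1, h2, -⟩; exact hpq ⟨h1.symm, h2.symm⟩), hg p q,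
        if_congr (and_congr_left' (mem_snoc_ne P i j p q hpq)) rfl rfl]
  · rw [if_neg hv]
    refine ⟨hsh, fun p q => ?_⟩
    rw [hg p q]
    by_cases hpq : i = p ∧ j = q
    · obtain ⟨rfl, rfl⟩ := hpq
      by_cases h3 : 3 ≤ gN t1 i j
      · have hmem : (i, j) ∈ P := by
          by_contra hm
          have h0 := hg i j
          rw [if_neg (by rintro ⟨hm2, -⟩; exact hm hm2)] at h0
          omega
        rw [if_pos ⟨hmem, h3⟩, if_pos ⟨by simp [hmem], h3⟩]
      · rw [if_neg (by rintro ⟨-, h2⟩; exact h3 h2),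
          if_neg (by rintro ⟨-, h2⟩; exact h3 h2)]
    · rw [if_congr (and_congr_left' (mem_snoc_ne P i j p q hpq)) rfl rfl]

theorem inv2_fold (t1 : List (List Int)) :
    ∀ (Q P : List (Nat × Nat)) (s : List (List Int)),
      (∀ ab ∈ Q, ab.1 < t1.length ∧ ab.2 < rlen t1 ab.1) → Inv2 t1 s P →
      Inv2 t1 (Q.foldl (fun t ab => stepA2 t (ab.1 : Int) (ab.2 : Int)) s) (P ++ Q) := by
  intro Q
  induction Q with
  | nil => intro P s _ h; simpa using h
  | cons ab Q ih =>
    intro P s hQ h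
    have h1 := inv2_step t1 s P ab.1 ab.2 (hQ ab (by simp)).1 (hQ ab (by simp)).2 h
    have h2 := ih (P ++ [ab]) _ (fun x hx => hQ x (by simp [hx])) h1
    simpa using h2

theorem invB_step (H W : Int) (tree s : List (List Int)) (P : List (Nat × Nat)) (i j : Nat)
    (hlen : H.toNat ≤ tree.length) (hrow : ∀ p < H.toNat, W.toNat ≤ rlen tree p)
    (hi : i < H.toNat) (hj : j < W.toNat) (hInv : InvB H W tree s P) :
    InvB H W tree (stepB H W tree s (i : Int) (j : Int)) (P ++ [(i, j)]) := by
  obtain ⟨hsh, hg⟩ := hInv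
  unfold stepB
  by_cases hb : boomP H W tree (i : Int) (j : Int)
  · rw [if_pos hb]
    refine ⟨shape_trans hsh (shape_setC s (i : Int) (j : Int) 0), fun p q => ?_⟩
    rw [gN_setC]
    by_cases hpq : i = p ∧ j = q
    · obtain ⟨rfl, rfl⟩ := hpq
      rw [if_pos ⟨rfl, rfl, by rw [hsh.1]; omega,
          by rw [hsh.2]; exact lt_of_lt_of_le hj (hrow i hi)⟩,
        if_pos ⟨by simp, hb⟩]
    · rw [if_neg (by rintro ⟨h1, h2, -⟩; exact hpq ⟨h1.symm, h2.symm⟩), hg p q,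
        if_congr (and_congr_left' (mem_snoc_ne P i j p q hpq)) rfl rfl]
  · rw [if_neg hb]
    refine ⟨hsh, fun p q => ?_⟩
    rw [hg p q]
    by_cases hpq : i = p ∧ j = q
    · obtain ⟨rfl, rfl⟩ := hpq
      rw [if_neg (fun hc => hb hc.2), if_neg (fun hc => hb hc.2)]
    · rw [if_congr (and_congr_left' (mem_snoc_ne P i j p q hpq)) rfl rfl]

theorem invB_fold (H W : Int) (tree : List (List Int))
    (hlen : H.toNat ≤ tree.length) (hrow : ∀ p < H.toNat, W.toNat ≤ rlen tree p) :
    ∀ (Q P : List (Nat × Nat)) (s : List (List Int)),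
      (∀ ab ∈ Q, ab.1 < H.toNat ∧ ab.2 < W.toNat) → InvB H W tree s P →
      InvB H W tree
        (Q.foldl (fun t ab => stepB H W tree t (ab.1 : Int) (ab.2 : Int)) s) (P ++ Q) := by
  intro Q
  induction Q with
  | nil => intro P s _ h; simpa using h
  | cons ab Q ih =>
    intro P s hQ h
    have h1 := invB_step H W tree s P ab.1 ab.2 hlen hrow (hQ ab (by simp)).1 (hQ ab (by simp)).2 h
    have := ih (P ++ [ab]) _ (fun x hx => hQ x (by simp [hx])) h1
    simpa using this

theorem mem_posL (Hn Wn : Nat) (ab : Nat × Nat) :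
    ab ∈ posL Hn Wn ↔ ab.1 < Hn ∧ ab.2 < Wn := by
  rcases ab with ⟨a, b⟩
  simp [posL, List.mem_flatMap]

theorem fired_posL (tree : List (List Int)) (Hn Wn p q : Nat) :
    fired tree (posL Hn Wn) p q = true ↔
      ∃ a b, a < Hn ∧ b < Wn ∧ adjN a b p q = true ∧ 3 ≤ gN tree a b := by
  simp only [fired, List.any_eq_true]
  constructor
  · rintro ⟨⟨a, b⟩, hm, hb⟩
    rw [mem_posL] at hm
    simp only [Bool.and_eq_true, decide_eq_true_eq] at hb
    exact ⟨a, b, hm.1, hm.2, hb.2, hb.1⟩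
  · rintro ⟨a, b, h1, h2, h3, h4⟩
    exact ⟨(a, b), (mem_posL _ _ _).2 ⟨h1, h2⟩, by simp [h3, h4]⟩

theorem boomP_iff (H W : Int) (tree : List (List Int)) (p q : Nat)
    (hp : p < H.toNat) (hq : q < W.toNat) :
    boomP H W tree (p : Int) (q : Int) ↔
      (3 ≤ gN tree p q ∨ fired tree (posL H.toNat W.toNat) p q = true) := by
  unfold boomP
  constructor
  · rintro (h | ⟨h0, h⟩ | ⟨h0, h⟩ | ⟨h0, h⟩ | ⟨h0, h⟩)
    · exact Or.inl (by rwa [cellG_natCast] at h)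
    · refine Or.inr ((fired_posL tree _ _ p q).2 ⟨p - 1, q, by omega, hq,
        by simp only [adjN]; simp; omega, ?_⟩)
      rwa [show ((p : Int) - 1) = ((p - 1 : Nat) : Int) by omega, cellG_natCast] at h
    · refine Or.inr ((fired_posL tree _ _ p q).2 ⟨p + 1, q, by omega, hq,
        by simp only [adjN]; simp, ?_⟩)
      rwa [show ((p : Int) + 1) = ((p + 1 : Nat) : Int) by omega, cellG_natCast] at h
    · refine Or.inr ((fired_posL tree _ _ p q).2 ⟨p, q - 1, hp, by omega,
        by simp only [adjN]; simp; omega, ?_⟩)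
      rwa [show ((q : Int) - 1) = ((q - 1 : Nat) : Int) by omega, cellG_natCast] at h
    · refine Or.inr ((fired_posL tree _ _ p q).2 ⟨p, q + 1, hp, by omega,
        by simp only [adjN]; simp, ?_⟩)
      rwa [show ((q : Int) + 1) = ((q + 1 : Nat) : Int) by omega, cellG_natCast] at h
  · rintro (h | hf)
    · exact Or.inl (by rw [cellG_natCast]; exact h)
    · obtain ⟨a, b, ha, hb, hadj, hval⟩ := (fired_posL tree _ _ p q).1 hf
      simp only [adjN, Bool.or_eq_true, Bool.and_eq_true, beq_iff_eq] at hadj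
      rcases hadj with ⟨ha1, hb1 | hb1⟩ | ⟨hb1, ha1 | ha1⟩
      · refine Or.inr (Or.inr (Or.inr (Or.inl ⟨by omega, ?_⟩)))
        rw [show ((q : Int) - 1) = ((b : Nat) : Int) by omega, cellG_natCast, ← ha1]
        exact hval
      · refine Or.inr (Or.inr (Or.inr (Or.inr ⟨by omega, ?_⟩)))
        rw [show ((q : Int) + 1) = ((b : Nat) : Int) by omega, cellG_natCast, ← ha1]
        exact hval
      · refine Or.inr (Or.inl ⟨by omega, ?_⟩)
        rw [show ((p : Int) - 1) = ((a : Nat) : Int) by omega, cellG_natCast, ← hb1]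
        exact hval
      · refine Or.inr (Or.inr (Or.inl ⟨by omega, ?_⟩))
        rw [show ((p : Int) + 1) = ((a : Nat) : Int) by omega, cellG_natCast, ← hb1]
        exact hval

theorem eq_of_shape_gN (tree s u : List (List Int)) (hs : Shape tree s) (hu : Shape tree u)
    (h : ∀ p q, gN s p q = gN u p q) : s = u := by
  apply List.ext_getElem
  · rw [hs.1, hu.1]
  · intro p h1 h2
    apply List.ext_getElem
    · have hl := (hs.2 p).trans (hu.2 p).symm
      rw [rlen_eq s p h1, rlen_eq u p h2] at hl
      exact hl
    · intro q hq1 hq2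
      have hv := h p q
      rw [gN_eq s p q h1 hq1, gN_eq u p q h2 hq2] at hv
      exact hv

theorem destroy_tree_spec : Claim_equal_destroy_tree := by
  unfold Claim_equal_destroy_tree
  intro H W tree hdom hpre
  unfold Spec_destroy_tree
  have eA : destroy_tree H W tree
      = (posL H.toNat W.toNat).foldl (fun t ab => stepA2 t (ab.1 : Int) (ab.2 : Int))
          ((posL H.toNat W.toNat).foldl
            (fun t ab => stepA1 H W t (ab.1 : Int) (ab.2 : Int)) tree) := by
    show (PySem.List.pyRange 0 H 1).foldl
        (fun t i => (PySem.List.pyRange 0 W 1).foldl (fun t j => stepA2 t i j) t)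
        ((PySem.List.pyRange 0 H 1).foldl
          (fun t i => (PySem.List.pyRange 0 W 1).foldl (fun t j => stepA1 H W t i j) t) tree)
      = _
    rw [nested_eq, nested_eq]
  have eB : destroy_tree_alt H W tree
      = (posL H.toNat W.toNat).foldl
          (fun t ab => stepB H W tree t (ab.1 : Int) (ab.2 : Int)) tree := by
    show (PySem.List.pyRange 0 H 1).foldl
        (fun t i => (PySem.List.pyRange 0 W 1).foldl
          (fun t j => stepB H W (tree.map (fun row => row)) t i j) t) tree
      = _
    rw [List.map_id']
    rw [nested_eq]
  rw [eA, eB]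
  by_cases hHW : 0 < H ∧ 0 < W
  · obtain ⟨hH, hW⟩ := hHW
    obtain ⟨hlen, htake⟩ := hpre hH hW
    have hrow : ∀ p < H.toNat, W.toNat ≤ rlen tree p := by
      intro p hpn
      have hplen : p < (tree.take H.toNat).length := by simp [List.length_take]; omega
      have hmem := htake ((tree.take H.toNat)[p]) (List.getElem_mem hplen)
      rw [List.getElem_take] at hmem
      rw [rlen_eq tree p (by omega)]
      exact hmem
    have h1 := inv_fold H W tree hlen hrow (posL H.toNat W.toNat) [] tree
      (fun ab hab => (mem_posL _ _ ab).1 hab) ⟨shape_refl tree, fun p q => by simp [fired]⟩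
    rw [List.nil_append] at h1
    set t1 := (posL H.toNat W.toNat).foldl
      (fun t ab => stepA1 H W t (ab.1 : Int) (ab.2 : Int)) tree with ht1
    obtain ⟨sh1, hg1⟩ := h1
    have h2 := inv2_fold t1 (posL H.toNat W.toNat) [] t1
      (fun ab hab => ⟨by rw [sh1.1]; have := (mem_posL _ _ ab).1 hab; omega,
        by rw [sh1.2]
           exact lt_of_lt_of_le ((mem_posL _ _ ab).1 hab).2
             (hrow ab.1 ((mem_posL _ _ ab).1 hab).1)⟩)
      ⟨shape_refl t1, fun p q => by simp⟩
    rw [List.nil_append] at h2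
    obtain ⟨sh2, hg2⟩ := h2
    have hB := invB_fold H W tree hlen hrow (posL H.toNat W.toNat) [] tree
      (fun ab hab => (mem_posL _ _ ab).1 hab) ⟨shape_refl tree, fun p q => by simp⟩
    rw [List.nil_append] at hB
    obtain ⟨shB, hgB⟩ := hB
    refine eq_of_shape_gN tree _ _ (shape_trans sh1 sh2) shB (fun p q => ?_)
    rw [hg2 p q, hgB p q]
    by_cases hmem : (p, q) ∈ posL H.toNat W.toNat
    · obtain ⟨hpHn, hqWn⟩ := (mem_posL _ _ _).1 hmem
      by_cases h3 : 3 ≤ gN tree p q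
      · have e1 : gN t1 p q = gN tree p q := by
          rw [hg1 p q, if_neg (by rintro ⟨-, -, hlt, -⟩; omega)]
        rw [if_pos ⟨hmem, by rw [e1]; exact h3⟩,
          if_pos ⟨hmem, (boomP_iff H W tree p q hpHn hqWn).2 (Or.inl h3)⟩]
      · by_cases hf : fired tree (posL H.toNat W.toNat) p q = true
        · have e1 : gN t1 p q = 0 := by
            rw [hg1 p q, if_pos ⟨hpHn, hqWn, by omega, hf⟩]
          rw [if_neg (by rintro ⟨-, h2x⟩; rw [e1] at h2x; omega), e1,
            if_pos ⟨hmem, (boomP_iff H W tree p q hpHn hqWn).2 (Or.inr hf)⟩]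
        · have e1 : gN t1 p q = gN tree p q := by
            rw [hg1 p q, if_neg (by rintro ⟨-, -, -, h4x⟩; exact hf h4x)]
          rw [if_neg (by rintro ⟨-, h2x⟩; rw [e1] at h2x; omega), e1,
            if_neg (by
              rintro ⟨-, hbm⟩
              rcases (boomP_iff H W tree p q hpHn hqWn).1 hbm with h | h
              · omega
              · exact hf h)]
    · have e1 : gN t1 p q = gN tree p q := by
        rw [hg1 p q, if_neg (by
          rintro ⟨h1x, h2x, -⟩
          exact hmem ((mem_posL _ _ _).2 ⟨h1x, h2x⟩))]
      rw [if_neg (by rintro ⟨hm, -⟩; exact hmem hm), e1,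
        if_neg (by rintro ⟨hm, -⟩; exact hmem hm)]
  · have hnil : posL H.toNat W.toNat = [] := by
      have h0 : H.toNat = 0 ∨ W.toNat = 0 := by omega
      rcases h0 with h | h <;> simp [posL, h]
    rw [hnil]
    simp only [List.foldl_nil]
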